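-- pv_equiv track=rewrite | github.com/ayanchoudhary/cryptopals | set-1/set_1_6.py | transpose_cipher_blocks
-- ===== SOURCE A (Python) =====
-- def transpose_cipher_blocks(initial_blocks,keysize):
--     cipher_blocks = []
--     for key in range(keysize):
--         transpose_string = ''
--         for string in initial_blocks:
--             if len(string) < key+1:
--                 continue
--             else:
--                 transpose_string += string[key]
--         if len(transpose_string)%2 == 0:
--             cipher_blocks.append(transpose_string)
--         else:
--             transpose_string = '0' + transpose_string
--             cipher_blocks.append(transpose_string)
--     return cipher_blocks
-- ===== SOURCE B (Python) =====
-- def transpose_cipher_blocks(initial_blocks, keysize):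
--     # one scatter pass: distribute each block's chars into per-column buckets
--     cols = [[] for _ in range(keysize)]
--     for block in initial_blocks:
--         for col, ch in zip(cols, block):
--             col.append(ch)
--     cipher_blocks = []
--     for col in cols:
--         s = ''.join(col)
--         cipher_blocks.append(s if len(s) % 2 == 0 else '0' + s)
--     return cipher_blocks
-- ===== Notes on version B (the rewrite author's own statement) =====
-- stated objective: faster
-- what changed: Replaces A's keysize repeated scans of the whole block list (one per key position) with a single scatter pass that zips each block's characters into per-column buckets, then joins and pads each bucket.
import Mathlib
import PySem

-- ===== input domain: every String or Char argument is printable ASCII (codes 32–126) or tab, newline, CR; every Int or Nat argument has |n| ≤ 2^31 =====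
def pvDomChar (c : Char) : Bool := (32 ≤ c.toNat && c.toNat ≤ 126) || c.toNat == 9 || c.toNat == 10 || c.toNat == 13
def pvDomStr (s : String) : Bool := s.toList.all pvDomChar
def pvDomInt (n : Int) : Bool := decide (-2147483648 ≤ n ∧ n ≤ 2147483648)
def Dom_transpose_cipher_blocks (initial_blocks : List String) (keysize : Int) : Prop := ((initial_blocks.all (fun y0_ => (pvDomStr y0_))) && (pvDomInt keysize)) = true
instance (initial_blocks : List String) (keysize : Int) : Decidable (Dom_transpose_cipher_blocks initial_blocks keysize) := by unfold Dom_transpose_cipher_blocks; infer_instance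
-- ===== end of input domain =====

-- B replaces A's keysize repeated scans of the block list by a single scatter pass
-- distributing each block's characters into per-column buckets (alternative decomposition).

-- ===== PORT A =====
-- A: for each key in range(keysize), scan all blocks collecting string[key] when long enough,
-- then prefix '0' if the column length is odd.  (string[key] is in range under the length guard,
-- so it is ported as pyGetD on the char list — exact there.)
def transpose_cipher_blocks (initial_blocks : List String) (keysize : Int) : List String :=
  (PySem.List.pyRange 0 keysize 1).foldl (fun cipher_blocks key =>
    let t : List Char := initial_blocks.foldl (fun ts s =>
      if (PySem.Str.len s) < key + 1 then ts
      else ts ++ [PySem.List.pyGetD s.toList key 'a']) []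
    if t.length % 2 == 0 then cipher_blocks ++ [String.ofList t]
    else cipher_blocks ++ [String.ofList ('0' :: t)]) []

-- ===== PORT B =====
-- zip(cols, block): each of the first min(|cols|,|block|) columns gets the matching char appended.
def pvScatter (cols : List (List Char)) (chars : List Char) : List (List Char) :=
  match cols, chars with
  | [], _ => []
  | cs, [] => cs
  | c :: cs, ch :: rest => (c ++ [ch]) :: pvScatter cs rest

def transpose_cipher_blocks_alt (initial_blocks : List String) (keysize : Int) : List String :=
  let cols : List (List Char) :=
    initial_blocks.foldl (fun cols block => pvScatter cols block.toList)
      (List.replicate keysize.toNat [])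
  cols.foldl (fun cipher_blocks col =>
    cipher_blocks ++ [if col.length % 2 == 0 then String.ofList col else String.ofList ('0' :: col)]) []

-- ===== PRECONDITION & SPEC =====
def Spec_transpose_cipher_blocks (initial_blocks : List String) (keysize : Int) (out : List String) : Prop := out = transpose_cipher_blocks_alt initial_blocks keysize
instance (initial_blocks : List String) (keysize : Int) (out : List String) : Decidable (Spec_transpose_cipher_blocks initial_blocks keysize out) := by unfold Spec_transpose_cipher_blocks; infer_instance

-- ===== CLAIM (what is proved, stated in full; the proofs are below) =====
def Claim_equal_transpose_cipher_blocks : Prop := ∀ (initial_blocks : List String) (keysize : Int), Dom_transpose_cipher_blocks initial_blocks keysize → Spec_transpose_cipher_blocks initial_blocks keysize (transpose_cipher_blocks initial_blocks keysize)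

-- ===== LEMMAS AND PROOFS =====

-- the k-th column's characters, abstractly
def pvCol (blocks : List String) (k : Nat) : List Char :=
  blocks.flatMap (fun s => (s.toList[k]?).toList)

theorem pvScatter_length (cols : List (List Char)) (chars : List Char) :
    (pvScatter cols chars).length = cols.length := by
  induction cols generalizing chars with
  | nil => simp [pvScatter]
  | cons c cs ih =>
    cases chars with
    | nil => simp [pvScatter]
    | cons ch rest => simp [pvScatter, ih]

theorem pvScatter_getElem (cols : List (List Char)) (chars : List Char) (k : Nat)
    (h : k < cols.length) :
    (pvScatter cols chars)[k]'(by rw [pvScatter_length]; exact h)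
      = cols[k] ++ (chars[k]?).toList := by
  induction cols generalizing chars k with
  | nil => simp at h
  | cons c cs ih =>
    cases chars with
    | nil => cases k <;> simp [pvScatter]
    | cons ch rest =>
      cases k with
      | zero => simp [pvScatter]
      | succ n => simpa [pvScatter] using ih rest n (by simpa using h)

theorem pvFold_length (blocks : List String) (cols : List (List Char)) :
    (blocks.foldl (fun cols block => pvScatter cols block.toList) cols).length = cols.length := by
  induction blocks generalizing cols with
  | nil => rfl
  | cons b bs ih => simp [List.foldl, ih, pvScatter_length]

theorem pvFold_getElem (blocks : List String) (cols : List (List Char)) (k : Nat)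
    (h : k < cols.length) :
    (blocks.foldl (fun cols block => pvScatter cols block.toList) cols)[k]'(by rw [pvFold_length]; exact h)
      = cols[k] ++ pvCol blocks k := by
  induction blocks generalizing cols with
  | nil => simp [pvCol]
  | cons b bs ih =>
    have h' : k < (pvScatter cols b.toList).length := by rw [pvScatter_length]; exact h
    simp only [List.foldl]
    rw [ih (pvScatter cols b.toList) h', pvScatter_getElem cols b.toList k h]
    simp [pvCol, List.append_assoc]

theorem pvColA_eq (blocks : List String) (k : Nat) (ts : List Char) :
    blocks.foldl (fun ts s =>
      if (PySem.Str.len s) < (k : Int) + 1 then ts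
      else ts ++ [PySem.List.pyGetD s.toList (k : Int) 'a']) ts
    = ts ++ pvCol blocks k := by
  induction blocks generalizing ts with
  | nil => simp [pvCol]
  | cons s bs ih =>
    simp only [List.foldl]
    rw [ih]
    have hL : s.toList.length = s.length := by simp
    by_cases hk : k < s.toList.length
    · have hg : ¬ (PySem.Str.len s < (k : Int) + 1) := by
        simp only [PySem.Str.len_eq]; omega
      rw [if_neg hg]
      have : PySem.List.pyGetD s.toList (k : Int) 'a' = s.toList[k] :=
        PySem.List.pyGetD_ofNat s.toList k 'a' hk
      simp [pvCol, this, List.getElem?_eq_getElem hk, List.append_assoc]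
    · have hg : PySem.Str.len s < (k : Int) + 1 := by
        simp only [PySem.Str.len_eq]; omega
      rw [if_pos hg]
      simp [pvCol, List.getElem?_eq_none (by omega : s.toList.length ≤ k)]

-- the shared padding step
def pvPad (t : List Char) : String :=
  if t.length % 2 == 0 then String.ofList t else String.ofList ('0' :: t)

theorem pvA_eq_map (blocks : List String) (keysize : Int) :
    transpose_cipher_blocks blocks keysize
      = (List.range keysize.toNat).map (fun k => pvPad (pvCol blocks k)) := by
  unfold transpose_cipher_blocks
  rw [PySem.List.pyRange_one 0 keysize]
  simp only [Int.sub_zero, zero_add]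
  induction keysize.toNat with
  | zero => simp
  | succ n ih =>
    rw [List.range_succ]
    simp only [List.map_append, List.foldl_append, List.map_cons, List.map_nil,
      List.foldl_cons, List.foldl_nil]
    rw [ih, pvColA_eq blocks n []]
    simp only [List.nil_append, pvPad]
    split_ifs with hh
    · simp
    · simp

theorem pvB_eq_map (blocks : List String) (keysize : Int) :
    transpose_cipher_blocks_alt blocks keysize
      = (List.range keysize.toNat).map (fun k => pvPad (pvCol blocks k)) := by
  unfold transpose_cipher_blocks_alt
  have hcols : (blocks.foldl (fun cols block => pvScatter cols block.toList)
      (List.replicate keysize.toNat []))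
      = (List.range keysize.toNat).map (fun k => pvCol blocks k) := by
    apply List.ext_getElem
    · simp [pvFold_length]
    · intro k h1 h2
      have hk : k < (List.replicate keysize.toNat ([] : List Char)).length := by
        simpa [pvFold_length] using h1
      rw [pvFold_getElem blocks _ k hk]
      simp [List.getElem_replicate]
  rw [hcols]
  have : ∀ (l : List (List Char)) (acc : List String),
      l.foldl (fun cb col =>
        cb ++ [if col.length % 2 == 0 then String.ofList col else String.ofList ('0' :: col)]) acc
      = acc ++ l.map pvPad := by
    intro l
    induction l with
    | nil => simp
    | cons c cs ih =>
      intro acc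
      simp only [List.foldl_cons, List.map_cons]
      rw [ih]
      simp [pvPad, List.append_assoc]
  rw [this ((List.range keysize.toNat).map (fun k => pvCol blocks k)) []]
  simp

-- ===== VERDICT (by name: the statement is the Claim_ definition above) =====
theorem transpose_cipher_blocks_spec : Claim_equal_transpose_cipher_blocks := by
  intro blocks keysize _
  unfold Spec_transpose_cipher_blocks
  rw [pvA_eq_map, pvB_eq_map]
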